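-- pv_equiv track=rewrite | github.com/mauropanaioli-hub/12numeri-su-10 | app.py | _parse_numeri
-- ===== SOURCE A (Python) =====
-- from typing import List, Optional
--
-- def _parse_numeri(s: str, min_val=1, max_val=90) -> Optional[List[int]]:
--     try:
--         parts = s.strip().split()
--         nums = []
--         for p in parts:
--             n = int(p)
--             if n < min_val or n > max_val:
--                 return None
--             nums.append(n)
--         return nums
--     except ValueError:
--         return None
-- ===== SOURCE B (Python) =====
-- from typing import List, Optional
--
-- def _parse_numeri(s: str, min_val=1, max_val=90) -> Optional[List[int]]:
--     # two-phase: parse everything first, then validate the range via min/max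
--     try:
--         nums = [int(p) for p in s.split()]
--     except ValueError:
--         return None
--     if nums and (min(nums) < min_val or max(nums) > max_val):
--         return None
--     return nums
-- ===== Notes on version B (the rewrite author's own statement) =====
-- stated objective: simpler
-- what changed: B separates parsing from validation: one comprehension builds the whole int list (try/except for ValueError), then a single min/max check replaces A's interleaved per-element early-exit loop; the explicit strip() is dropped since split() already ignores surrounding whitespace.
import Mathlib
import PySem

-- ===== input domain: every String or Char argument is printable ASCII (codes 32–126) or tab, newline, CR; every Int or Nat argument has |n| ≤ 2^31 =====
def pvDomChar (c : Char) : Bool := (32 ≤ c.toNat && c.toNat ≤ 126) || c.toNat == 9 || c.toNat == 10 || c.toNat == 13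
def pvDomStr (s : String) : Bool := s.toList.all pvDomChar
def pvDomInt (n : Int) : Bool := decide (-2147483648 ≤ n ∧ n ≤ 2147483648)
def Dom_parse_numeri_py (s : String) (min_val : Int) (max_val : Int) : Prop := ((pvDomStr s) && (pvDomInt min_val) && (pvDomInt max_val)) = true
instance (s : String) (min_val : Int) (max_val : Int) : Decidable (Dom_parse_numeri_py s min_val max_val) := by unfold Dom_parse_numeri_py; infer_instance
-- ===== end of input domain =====

-- B separates parsing (mapM over the words) from validation (one min/max check) instead of
-- A's interleaved early-exit loop; objective: simpler.

-- ===== PORT A =====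
-- A's loop: parse each word in turn, range-check it immediately (early return None),
-- append to the accumulator; int() failure (ValueError) returns None.
def pvLoopA (min_val max_val : Int) : List String → List Int → Option (List Int)
  | [], nums => some nums
  | p :: rest, nums =>
      match PySem.Int.ofStr? p with
      | none => none          -- ValueError caught by the try/except
      | some n =>
          if n < min_val ∨ n > max_val then none
          else pvLoopA min_val max_val rest (nums ++ [n])

def parse_numeri_py (s : String) (min_val : Int) (max_val : Int) : Option (List Int) :=
  pvLoopA min_val max_val (PySem.Str.split₀ (PySem.Str.strip s)) []

-- ===== PORT B =====
def parse_numeri_py_alt (s : String) (min_val : Int) (max_val : Int) : Option (List Int) :=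
  match (PySem.Str.split₀ s).mapM PySem.Int.ofStr? with
  | none => none              -- ValueError in the comprehension
  | some [] => some []        -- empty list is falsy: no range check
  | some (x :: t) =>          -- min/max as Python computes them: running fold
      if t.foldl min x < min_val ∨ t.foldl max x > max_val then none
      else some (x :: t)

-- ===== PRECONDITION & SPEC =====
def Spec_parse_numeri_py (s : String) (min_val : Int) (max_val : Int) (out : Option (List Int)) : Prop := out = parse_numeri_py_alt s min_val max_val
instance (s : String) (min_val : Int) (max_val : Int) (out : Option (List Int)) : Decidable (Spec_parse_numeri_py s min_val max_val out) := by unfold Spec_parse_numeri_py; infer_instance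

-- ===== CLAIM (what is proved, stated in full; the proofs are below) =====
def Claim_equal_parse_numeri_py : Prop := ∀ (s : String) (min_val : Int) (max_val : Int), Dom_parse_numeri_py s min_val max_val → Spec_parse_numeri_py s min_val max_val (parse_numeri_py s min_val max_val)

-- ===== LEMMAS AND PROOFS =====

-- split₀.go on an all-whitespace tail just flushes the current word.
lemma pv_split₀_go_allspace (sp : List Char) (cur : List Char) (acc : List (List Char))
    (h : ∀ c ∈ sp, PySem.Chars.isspace c = true) :
    PySem.Chars.split₀.go sp cur acc =
      (if cur.isEmpty then acc.reverse else (cur.reverse :: acc).reverse) := by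
  induction sp generalizing cur acc with
  | nil => simp [PySem.Chars.split₀.go]
  | cons c rest ih =>
      have hc : PySem.Chars.isspace c = true := h c (by simp)
      have hr : ∀ x ∈ rest, PySem.Chars.isspace x = true := fun x hx => h x (by simp [hx])
      by_cases hcur : cur.isEmpty
      · simp [PySem.Chars.split₀.go, hc, hcur, ih _ _ hr]
      · simp [PySem.Chars.split₀.go, hc, hcur, ih _ _ hr]

-- leading whitespace is skipped by split₀.go itself
lemma pv_split₀_go_lstrip (cs : List Char) (acc : List (List Char)) :
    PySem.Chars.split₀.go (cs.dropWhile PySem.Chars.isspace) [] acc =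
    PySem.Chars.split₀.go cs [] acc := by
  induction cs with
  | nil => rfl
  | cons c rest ih =>
      by_cases hc : PySem.Chars.isspace c = true
      · simpa [List.dropWhile_cons, hc, PySem.Chars.split₀.go] using ih
      · simp [List.dropWhile_cons, hc]

-- trailing whitespace does not change split₀.go
lemma pv_split₀_go_append_space (cs sp : List Char) (cur : List Char) (acc : List (List Char))
    (h : ∀ c ∈ sp, PySem.Chars.isspace c = true) :
    PySem.Chars.split₀.go (cs ++ sp) cur acc = PySem.Chars.split₀.go cs cur acc := by
  induction cs generalizing cur acc with
  | nil => simp [pv_split₀_go_allspace sp cur acc h, PySem.Chars.split₀.go]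
  | cons c rest ih =>
      by_cases hc : PySem.Chars.isspace c = true
      · by_cases hcur : cur.isEmpty <;>
          simp [PySem.Chars.split₀.go, hc, hcur, ih]
      · simp [PySem.Chars.split₀.go, hc, ih]

lemma pv_split₀_strip (cs : List Char) :
    PySem.Chars.split₀ (PySem.Chars.strip cs) = PySem.Chars.split₀ cs := by
  unfold PySem.Chars.strip PySem.Chars.rstrip PySem.Chars.lstrip PySem.Chars.split₀
  have h1 : ∀ c ∈ (List.takeWhile PySem.Chars.isspace (List.dropWhile PySem.Chars.isspace cs).reverse).reverse,
      PySem.Chars.isspace c = true := by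
    intro c hc
    exact List.mem_takeWhile_imp (List.mem_reverse.mp hc)
  have h2 : (List.dropWhile PySem.Chars.isspace (List.dropWhile PySem.Chars.isspace cs).reverse).reverse ++
      (List.takeWhile PySem.Chars.isspace (List.dropWhile PySem.Chars.isspace cs).reverse).reverse =
      List.dropWhile PySem.Chars.isspace cs := by
    rw [← List.reverse_append, List.takeWhile_append_dropWhile, List.reverse_reverse]
  calc PySem.Chars.split₀.go (List.dropWhile PySem.Chars.isspace (List.dropWhile PySem.Chars.isspace cs).reverse).reverse [] []
      = PySem.Chars.split₀.go ((List.dropWhile PySem.Chars.isspace (List.dropWhile PySem.Chars.isspace cs).reverse).reverse ++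
          (List.takeWhile PySem.Chars.isspace (List.dropWhile PySem.Chars.isspace cs).reverse).reverse) [] [] :=
        (pv_split₀_go_append_space _ _ _ _ h1).symm
    _ = PySem.Chars.split₀.go (List.dropWhile PySem.Chars.isspace cs) [] [] := by rw [h2]
    _ = PySem.Chars.split₀.go cs [] [] := pv_split₀_go_lstrip cs []

lemma pv_str_split₀_strip (s : String) :
    PySem.Str.split₀ (PySem.Str.strip s) = PySem.Str.split₀ s := by
  unfold PySem.Str.split₀ PySem.Str.strip
  simp [pv_split₀_strip]

-- A's loop in terms of a full parse followed by an any-out-of-range check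
lemma pv_loopA_eq (lo hi : Int) (ps : List String) (nums : List Int) :
    pvLoopA lo hi ps nums =
      match ps.mapM PySem.Int.ofStr? with
      | none => none
      | some ns => if ns.any (fun n => decide (n < lo) || decide (n > hi)) then none
                   else some (nums ++ ns) := by
  induction ps generalizing nums with
  | nil => simp [pvLoopA]
  | cons p rest ih =>
      cases hp : PySem.Int.ofStr? p with
      | none => simp [pvLoopA, hp, List.mapM_cons]
      | some n =>
          cases hrest : rest.mapM PySem.Int.ofStr? with
          | none =>
              by_cases hn : n < lo ∨ n > hi <;>
                simp [pvLoopA, hp, hn, List.mapM_cons, hrest, ih]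
          | some ns =>
              by_cases hn : n < lo ∨ n > hi
              · have hany : (n :: ns).any (fun m => decide (m < lo) || decide (m > hi)) = true := by
                  simp only [List.any_cons, Bool.or_eq_true, decide_eq_true_eq]
                  tauto
                simp [pvLoopA, hp, hn, List.mapM_cons, hrest, hany]
              · have h1 : decide (n < lo) = false := by simp; omega
                have h2 : decide (n > hi) = false := by simp; omega
                simp [pvLoopA, hp, hn, List.mapM_cons, hrest, ih, List.any_cons, h1, h2]

lemma pv_foldl_min_lt (t : List Int) (x lo : Int) :
    (t.foldl min x < lo) ↔ (x < lo ∨ ∃ y ∈ t, y < lo) := by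
  induction t generalizing x with
  | nil => simp
  | cons a rest ih =>
      rw [List.foldl_cons, ih, min_lt_iff]
      constructor
      · rintro ((h | h) | ⟨y, hy, hlt⟩)
        · exact Or.inl h
        · exact Or.inr ⟨a, by simp, h⟩
        · exact Or.inr ⟨y, by simp [hy], hlt⟩
      · rintro (h | ⟨y, hy, hlt⟩)
        · exact Or.inl (Or.inl h)
        · rcases List.mem_cons.mp hy with rfl | hy'
          · exact Or.inl (Or.inr hlt)
          · exact Or.inr ⟨y, hy', hlt⟩

lemma pv_foldl_max_gt (t : List Int) (x hi : Int) :
    (hi < t.foldl max x) ↔ (hi < x ∨ ∃ y ∈ t, hi < y) := by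
  induction t generalizing x with
  | nil => simp
  | cons a rest ih =>
      rw [List.foldl_cons, ih, lt_max_iff]
      constructor
      · rintro ((h | h) | ⟨y, hy, hlt⟩)
        · exact Or.inl h
        · exact Or.inr ⟨a, by simp, h⟩
        · exact Or.inr ⟨y, by simp [hy], hlt⟩
      · rintro (h | ⟨y, hy, hlt⟩)
        · exact Or.inl (Or.inl h)
        · rcases List.mem_cons.mp hy with rfl | hy'
          · exact Or.inl (Or.inr hlt)
          · exact Or.inr ⟨y, hy', hlt⟩

-- ===== VERDICT (by name: the statement is the Claim_ definition above) =====
theorem parse_numeri_py_spec : Claim_equal_parse_numeri_py := by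
  intro s lo hi _
  unfold Spec_parse_numeri_py parse_numeri_py parse_numeri_py_alt
  rw [pv_str_split₀_strip, pv_loopA_eq]
  cases hm : (PySem.Str.split₀ s).mapM PySem.Int.ofStr? with
  | none => rfl
  | some ns =>
      cases ns with
      | nil => simp
      | cons x t =>
          simp only [List.nil_append]
          by_cases h : t.foldl min x < lo ∨ t.foldl max x > hi
          · have hany : (x :: t).any (fun n => decide (n < lo) || decide (n > hi)) = true := by
              simp only [List.any_eq_true, List.mem_cons, Bool.or_eq_true, decide_eq_true_eq]
              rcases h with h | h
              · rcases (pv_foldl_min_lt t x lo).mp h with h' | ⟨y, hy, hlt⟩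
                · exact ⟨x, Or.inl rfl, Or.inl h'⟩
                · exact ⟨y, Or.inr hy, Or.inl hlt⟩
              · rcases (pv_foldl_max_gt t x hi).mp h with h' | ⟨y, hy, hlt⟩
                · exact ⟨x, Or.inl rfl, Or.inr h'⟩
                · exact ⟨y, Or.inr hy, Or.inr hlt⟩
            simp [hany, h]
          · push_neg at h
            have hany : (x :: t).any (fun n => decide (n < lo) || decide (n > hi)) = false := by
              simp only [List.any_eq_false, List.mem_cons]
              rintro n (rfl | hn) <;>
                simp only [Bool.or_eq_true, decide_eq_true_eq, not_or] <;> constructor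
              · intro hlt; exact absurd ((pv_foldl_min_lt t n lo).mpr (Or.inl hlt)) (by omega)
              · intro hgt; exact absurd ((pv_foldl_max_gt t n hi).mpr (Or.inl hgt)) (by omega)
              · intro hlt; exact absurd ((pv_foldl_min_lt t x lo).mpr (Or.inr ⟨n, hn, hlt⟩)) (by omega)
              · intro hgt; exact absurd ((pv_foldl_max_gt t x hi).mpr (Or.inr ⟨n, hn, hgt⟩)) (by omega)
            have h1 : ¬ (t.foldl min x < lo ∨ t.foldl max x > hi) := by omega
            simp [hany, h1]
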